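-- pv_equiv track=rewrite | github.com/forrtproject/flora_preprint_notifier | osf_sync/extraction/extract_author_list.py | _merge_orcids
-- ===== SOURCE A (Python) =====
-- from typing import Any, Dict, Iterable, List, Optional, Set, Tuple
--
-- def _merge_orcids(rows: List[Dict[str, Any]]) -> Dict[str, int]:
--     counts = {"osf": 0, "xml": 0, "pdf": 0, "name": 0, "osf;xml": 0, "none": 0}
--     for row in rows:
--         osf = row.get("orcid.osf")
--         xml = row.get("orcid.xml")
--         pdf = row.get("orcid.pdf")
--         name = row.get("orcid.name")
--
--         orcid = None
--         source = None
--
--         if osf: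
--             orcid = osf
--             if xml and xml == osf:
--                 source = "osf;xml"
--             else:
--                 source = "osf"
--         elif xml:
--             orcid = xml
--             source = "xml"
--         elif pdf:
--             orcid = pdf
--             source = "pdf"
--         elif name:
--             orcid = name
--             source = "name"
--
--         row["orcid"] = orcid
--         row["orcid.source"] = source
--         if source:
--             counts[source] = counts.get(source, 0) + 1
--         else:
--             counts["none"] += 1
--     return counts
-- ===== SOURCE B (Python) =====
-- def _merge_orcids(rows):
--     def truthy(row, key):
--         return bool(row.get("orcid." + key))
--
--     def promoted(row):
--         # rows counted as "osf;xml": osf truthy, xml truthy and equal to osf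
--         return truthy(row, "osf") and truthy(row, "xml") and row.get("orcid.xml") == row.get("orcid.osf")
--
--     n_osfxml = sum(1 for r in rows if promoted(r))
--     n_osf = sum(1 for r in rows if truthy(r, "osf")) - n_osfxml
--     n_xml = sum(1 for r in rows if truthy(r, "xml") and not truthy(r, "osf"))
--     n_pdf = sum(1 for r in rows
--                 if truthy(r, "pdf") and not truthy(r, "xml") and not truthy(r, "osf"))
--     n_name = sum(1 for r in rows
--                  if truthy(r, "name") and not truthy(r, "pdf")
--                  and not truthy(r, "xml") and not truthy(r, "osf"))
--     counts = {"osf": n_osf, "xml": n_xml, "pdf": n_pdf, "name": n_name,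
--               "osf;xml": n_osfxml,
--               "none": len(rows) - (n_osf + n_xml + n_pdf + n_name + n_osfxml)}
--
--     # same in-place annotation of each row as the original
--     for row in rows:
--         orcid = (row.get("orcid.osf") or row.get("orcid.xml")
--                  or row.get("orcid.pdf") or row.get("orcid.name") or None)
--         row["orcid"] = orcid
--         if orcid is None:
--             source = None
--         elif promoted(row):
--             source = "osf;xml"
--         elif truthy(row, "osf"):
--             source = "osf"
--         elif truthy(row, "xml"):
--             source = "xml"
--         elif truthy(row, "pdf"):
--             source = "pdf"
--         else:
--             source = "name"
--         row["orcid.source"] = source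
--     return counts
-- ===== Notes on version B (the rewrite author's own statement) =====
-- stated objective: alternative
-- what changed: Instead of resolving a per-row source with an if/elif priority chain and incrementing a counts dict inside one loop, B computes each count directly as the cardinality of a boolean filter over the rows (osf;xml = promoted rows, osf = all-osf minus promoted, xml/pdf/name = truthy-and-no-higher-source) and derives the 'none' count arithmetically as len(rows) minus the sum of the others; the in-place row annotation is done in a separate pass using an or-chain for the orcid value.
import Mathlib
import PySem

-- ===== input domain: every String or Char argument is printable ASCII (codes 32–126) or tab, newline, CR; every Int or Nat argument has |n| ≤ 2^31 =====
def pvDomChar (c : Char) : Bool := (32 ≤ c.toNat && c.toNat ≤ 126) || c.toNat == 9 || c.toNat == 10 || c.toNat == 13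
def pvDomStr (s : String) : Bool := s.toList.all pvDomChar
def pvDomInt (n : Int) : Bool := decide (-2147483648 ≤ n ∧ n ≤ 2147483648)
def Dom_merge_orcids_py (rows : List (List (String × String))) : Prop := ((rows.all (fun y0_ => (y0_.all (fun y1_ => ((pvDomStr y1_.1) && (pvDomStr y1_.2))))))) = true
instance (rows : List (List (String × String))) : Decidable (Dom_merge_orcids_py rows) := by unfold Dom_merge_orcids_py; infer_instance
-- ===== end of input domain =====

-- B replaces A's single loop (if/elif priority chain + in-loop counts-dict increments) by
-- direct cardinalities of boolean filters over the rows, deriving "osf" by subtraction and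
-- "none" arithmetically from the length (objective: alternative decomposition). A mutates
-- each row dict in place (row["orcid"], row["orcid.source"]); B performs the same mutation
-- in Python, and the equivalence proved here is about the RETURN value (the counts dict).


-- ===== PORT A =====
-- Python truthiness of `row.get(k)` (an Option String): present and non-empty.
def pvTruthy (o : Option String) : Bool :=
  match o with
  | some s => s ≠ ""
  | none => false

-- one iteration of A's `for row in rows` loop (the counts-dict update; the row mutation
-- cannot affect the returned counts and is not modelled — return value only, see header)
def pvStepA (counts : PySem.Dict String Int) (row : List (String × String)) : PySem.Dict String Int :=
  let osf := (PySem.Dict.mk row).get? "orcid.osf"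
  let xml := (PySem.Dict.mk row).get? "orcid.xml"
  let pdf := (PySem.Dict.mk row).get? "orcid.pdf"
  let name := (PySem.Dict.mk row).get? "orcid.name"
  let source : Option String :=
    if pvTruthy osf then
      if pvTruthy xml && xml == osf then some "osf;xml" else some "osf"
    else if pvTruthy xml then some "xml"
    else if pvTruthy pdf then some "pdf"
    else if pvTruthy name then some "name"
    else none
  match source with
  | some s => counts.insert s (counts.getD s 0 + 1)   -- counts[source] = counts.get(source, 0) + 1
  | none => counts.modify "none" 0 (· + 1)            -- counts["none"] += 1 ("none" is always a key)

def merge_orcids_py (rows : List (List (String × String))) : List (String × Int) :=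
  (rows.foldl pvStepA
    (PySem.Dict.ofList [("osf", 0), ("xml", 0), ("pdf", 0), ("name", 0), ("osf;xml", 0), ("none", 0)])).items

-- ===== PORT B =====
-- B's helpers: truthy(row, key), promoted(row)
def pvT (row : List (String × String)) (key : String) : Bool :=
  pvTruthy ((PySem.Dict.mk row).get? ("orcid." ++ key))

def pvPromoted (row : List (String × String)) : Bool :=
  pvT row "osf" && pvT row "xml" &&
    ((PySem.Dict.mk row).get? "orcid.xml" == (PySem.Dict.mk row).get? "orcid.osf")

-- each `sum(1 for r in rows if pred(r))` is ported as List.countP; the in-place row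
-- annotation pass of Source B does not touch the returned counts and is not modelled.
def merge_orcids_py_alt (rows : List (List (String × String))) : List (String × Int) :=
  let nOsfXml : Int := rows.countP pvPromoted
  let nOsf : Int := (rows.countP (fun r => pvT r "osf") : Int) - nOsfXml
  let nXml : Int := rows.countP (fun r => pvT r "xml" && !pvT r "osf")
  let nPdf : Int := rows.countP (fun r => pvT r "pdf" && !pvT r "xml" && !pvT r "osf")
  let nName : Int := rows.countP
    (fun r => pvT r "name" && !pvT r "pdf" && !pvT r "xml" && !pvT r "osf")
  [("osf", nOsf), ("xml", nXml), ("pdf", nPdf), ("name", nName), ("osf;xml", nOsfXml),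
   ("none", (rows.length : Int) - (nOsf + nXml + nPdf + nName + nOsfXml))]

-- ===== PRECONDITION & SPEC =====
def Spec_merge_orcids_py (rows : List (List (String × String))) (out : List (String × Int)) : Prop := out = merge_orcids_py_alt rows
instance (rows : List (List (String × String))) (out : List (String × Int)) : Decidable (Spec_merge_orcids_py rows out) := by unfold Spec_merge_orcids_py; infer_instance

-- ===== CLAIM (what is proved, stated in full; the proofs are below) =====
def Claim_equal_merge_orcids_py : Prop := ∀ (rows : List (List (String × String))), Dom_merge_orcids_py rows → Spec_merge_orcids_py rows (merge_orcids_py rows)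

-- ===== LEMMAS AND PROOFS =====

-- proof-side label of a row: the source A's branch chain resolves to ("none" when falsy)
def pvClassify (row : List (String × String)) : String :=
  let osf := (PySem.Dict.mk row).get? "orcid.osf"
  let xml := (PySem.Dict.mk row).get? "orcid.xml"
  let pdf := (PySem.Dict.mk row).get? "orcid.pdf"
  let name := (PySem.Dict.mk row).get? "orcid.name"
  if pvTruthy osf then
    if pvTruthy xml && xml == osf then "osf;xml" else "osf"
  else if pvTruthy xml then "xml"
  else if pvTruthy pdf then "pdf"
  else if pvTruthy name then "name"
  else "none"

-- canonical shape of A's counts dict: always these six keys, in this order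
def pvCanon (a b c d e f : Int) : PySem.Dict String Int :=
  PySem.Dict.mk [("osf", a), ("xml", b), ("pdf", c), ("name", d), ("osf;xml", e), ("none", f)]

def pvCnt (s : String) (rows : List (List (String × String))) : Int :=
  rows.countP (fun r => pvClassify r == s)

-- one loop step of A increments exactly the pvClassify-label's slot
theorem pvStepA_canon (row : List (String × String)) (a b c d e f : Int) :
    pvStepA (pvCanon a b c d e f) row =
      pvCanon (a + (if pvClassify row = "osf" then 1 else 0))
              (b + (if pvClassify row = "xml" then 1 else 0))
              (c + (if pvClassify row = "pdf" then 1 else 0))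
              (d + (if pvClassify row = "name" then 1 else 0))
              (e + (if pvClassify row = "osf;xml" then 1 else 0))
              (f + (if pvClassify row = "none" then 1 else 0)) := by
  simp only [pvStepA, pvClassify, pvCanon]
  split_ifs <;>
    simp_all [PySem.Dict.insert, PySem.Dict.modify, PySem.Dict.getD, PySem.Dict.get?,
      PySem.Dict.contains]

-- loop invariant: A's whole fold adds the label counts to the canonical dict
theorem pvFoldl_canon (rows : List (List (String × String))) :
    ∀ a b c d e f : Int,
      rows.foldl pvStepA (pvCanon a b c d e f) =
        pvCanon (a + pvCnt "osf" rows) (b + pvCnt "xml" rows) (c + pvCnt "pdf" rows)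
                (d + pvCnt "name" rows) (e + pvCnt "osf;xml" rows) (f + pvCnt "none" rows) := by
  induction rows with
  | nil => intro a b c d e f; simp [pvCnt]
  | cons r rs ih =>
    intro a b c d e f
    rw [List.foldl_cons, pvStepA_canon, ih]
    simp only [pvCanon, pvCnt, PySem.Dict.mk.injEq, List.cons.injEq, Prod.mk.injEq,
      List.countP_cons, and_true, true_and]
    refine ⟨?_, ?_, ?_, ?_, ?_, ?_⟩ <;> (split_ifs <;> simp_all <;> omega)

-- per-row: B's boolean filters are the indicator functions of A's labels
theorem pvRow (r : List (String × String)) :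
    pvPromoted r = (pvClassify r == "osf;xml") ∧
    pvT r "osf" = ((pvClassify r == "osf") || (pvClassify r == "osf;xml")) ∧
    (pvT r "xml" && !pvT r "osf") = (pvClassify r == "xml") ∧
    (pvT r "pdf" && !pvT r "xml" && !pvT r "osf") = (pvClassify r == "pdf") ∧
    (pvT r "name" && !pvT r "pdf" && !pvT r "xml" && !pvT r "osf")
      = (pvClassify r == "name") ∧
    ((pvClassify r == "osf") || (pvClassify r == "xml") || (pvClassify r == "pdf") ||
     (pvClassify r == "name") || (pvClassify r == "osf;xml") || (pvClassify r == "none")) := by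
  have hosf : ("orcid." ++ "osf" : String) = "orcid.osf" := rfl
  have hxml : ("orcid." ++ "xml" : String) = "orcid.xml" := rfl
  have hpdf : ("orcid." ++ "pdf" : String) = "orcid.pdf" := rfl
  have hname : ("orcid." ++ "name" : String) = "orcid.name" := rfl
  simp only [pvPromoted, pvT, hosf, hxml, hpdf, hname, pvClassify]
  split_ifs <;> simp_all

-- lift pvRow to the counts B computes
theorem pvCounts (rows : List (List (String × String))) :
    (rows.countP pvPromoted : Int) = pvCnt "osf;xml" rows ∧
    (rows.countP (fun r => pvT r "osf") : Int) = pvCnt "osf" rows + pvCnt "osf;xml" rows ∧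
    (rows.countP (fun r => pvT r "xml" && !pvT r "osf") : Int) = pvCnt "xml" rows ∧
    (rows.countP (fun r => pvT r "pdf" && !pvT r "xml" && !pvT r "osf") : Int)
      = pvCnt "pdf" rows ∧
    (rows.countP (fun r => pvT r "name" && !pvT r "pdf" && !pvT r "xml" && !pvT r "osf") : Int)
      = pvCnt "name" rows ∧
    (rows.length : Int) = pvCnt "osf" rows + pvCnt "xml" rows + pvCnt "pdf" rows +
      pvCnt "name" rows + pvCnt "osf;xml" rows + pvCnt "none" rows := by
  induction rows with
  | nil => simp [pvCnt]
  | cons r rs ih =>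
    obtain ⟨h1, h2, h3, h4, h5, h6⟩ := pvRow r
    simp only [pvCnt, List.countP_cons, List.length_cons] at *
    rcases ih with ⟨i1, i2, i3, i4, i5, i6⟩
    by_cases c1 : pvClassify r = "osf" <;> by_cases c2 : pvClassify r = "xml" <;>
      by_cases c3 : pvClassify r = "pdf" <;> by_cases c4 : pvClassify r = "name" <;>
      by_cases c5 : pvClassify r = "osf;xml" <;> by_cases c6 : pvClassify r = "none" <;>
      simp_all <;> omega

-- ===== VERDICT (by name: the statement is the Claim_ definition above) =====
theorem merge_orcids_py_spec : Claim_equal_merge_orcids_py := by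
  intro rows _
  show merge_orcids_py rows = merge_orcids_py_alt rows
  have h0 : (PySem.Dict.ofList
      [("osf", (0:Int)), ("xml", 0), ("pdf", 0), ("name", 0), ("osf;xml", 0), ("none", 0)]) =
      pvCanon 0 0 0 0 0 0 := by decide
  obtain ⟨h1, h2, h3, h4, h5, h6⟩ := pvCounts rows
  rw [merge_orcids_py, h0, pvFoldl_canon]
  simp only [merge_orcids_py_alt, pvCanon, h1, h2, h3, h4, h5]
  refine by norm_num; omega
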